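-- pv_equiv track=rewrite | github.com/MTimea101/BGDTSQL | BackEnd/Select/joinExecutor.py | select_best_index
-- ===== SOURCE A (Python) =====
-- def select_best_index(suitable_indexes, target_column):
--     if not suitable_indexes:
--         return None
--
--     single_column_indexes = [idx for idx in suitable_indexes if idx["column_count"] == 1 and idx["position"] == 0]
--     if single_column_indexes:
--         return single_column_indexes[0]
--
--     prefix_indexes = [idx for idx in suitable_indexes if idx["position"] == 0]
--     if prefix_indexes:
--         return min(prefix_indexes, key=lambda x: x["column_count"])
--
--     other_indexes = [idx for idx in suitable_indexes if idx["position"] > 0]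
--     if other_indexes:
--         return min(other_indexes, key=lambda x: (x["position"], x["column_count"]))
--
--     return None
-- ===== SOURCE B (Python) =====
-- def select_best_index(suitable_indexes, target_column):
--     if not suitable_indexes:
--         return None
--     t1 = t2 = t3 = None
--     for idx in suitable_indexes:
--         c = idx["column_count"]
--         p = idx["position"]
--         if p == 0:
--             if c == 1 and t1 is None:
--                 t1 = idx
--             if t2 is None or c < t2["column_count"]:
--                 t2 = idx
--         elif p > 0:
--             if t3 is None or p < t3["position"] or (p == t3["position"] and c < t3["column_count"]):
--                 t3 = idx
--     if t1 is not None: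
--         return t1
--     if t2 is not None:
--         return t2
--     return t3
-- ===== Notes on version B (the rewrite author's own statement) =====
-- stated objective: alternative
-- what changed: Replaces A's three filter-then-min passes over the list with a single loop that maintains three candidates (first single-column prefix index, running min-column_count prefix index, running lexicographic-min other index) with strict first-wins updates.
import Mathlib
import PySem

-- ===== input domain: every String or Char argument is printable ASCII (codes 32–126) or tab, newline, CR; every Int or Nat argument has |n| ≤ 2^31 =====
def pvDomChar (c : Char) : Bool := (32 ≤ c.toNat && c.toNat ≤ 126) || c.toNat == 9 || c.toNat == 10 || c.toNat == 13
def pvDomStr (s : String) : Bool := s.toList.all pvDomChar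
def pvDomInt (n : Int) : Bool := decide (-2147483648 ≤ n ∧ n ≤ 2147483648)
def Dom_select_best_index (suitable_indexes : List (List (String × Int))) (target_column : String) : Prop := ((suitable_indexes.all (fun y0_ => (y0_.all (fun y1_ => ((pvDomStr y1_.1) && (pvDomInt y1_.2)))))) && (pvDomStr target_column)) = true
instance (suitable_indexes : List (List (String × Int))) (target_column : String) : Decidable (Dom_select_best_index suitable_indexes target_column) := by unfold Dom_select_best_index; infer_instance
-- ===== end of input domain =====

-- B replaces A's three filter-then-min passes with one loop carrying three candidates (alternative decomposition, same cost).

-- idx["k"]: first-match lookup; exact when the key is present (guaranteed by Pre_)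
def pvGet (d : List (String × Int)) (k : String) : Int := (PySem.Dict.mk d).getD k 0

-- ===== PORT A =====
def select_best_index (suitable_indexes : List (List (String × Int))) (target_column : String) : Option (List (String × Int)) :=
  if suitable_indexes = [] then none
  else
    let single_column_indexes := suitable_indexes.filter
      (fun idx => pvGet idx "column_count" == 1 && pvGet idx "position" == 0)
    match single_column_indexes with
    | x :: _ => some x
    | [] =>
      let prefix_indexes := suitable_indexes.filter (fun idx => pvGet idx "position" == 0)
      if prefix_indexes ≠ [] then
        PySem.List.min? prefix_indexes (fun x => pvGet x "column_count")
      else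
        let other_indexes := suitable_indexes.filter (fun idx => decide (pvGet idx "position" > 0))
        if other_indexes ≠ [] then
          PySem.List.min2? other_indexes (fun x => pvGet x "position") (fun x => pvGet x "column_count")
        else none

-- ===== PORT B =====
def pvStep (s : Option (List (String × Int)) × Option (List (String × Int)) × Option (List (String × Int)))
    (idx : List (String × Int)) :
    Option (List (String × Int)) × Option (List (String × Int)) × Option (List (String × Int)) :=
  let c := pvGet idx "column_count"
  let p := pvGet idx "position"
  if p == 0 then
    let t1 := if c == 1 && s.1.isNone then some idx else s.1
    let t2 := match s.2.1 with
      | none => some idx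
      | some t => if c < pvGet t "column_count" then some idx else some t
    (t1, t2, s.2.2)
  else if p > 0 then
    let t3 := match s.2.2 with
      | none => some idx
      | some t =>
        if p < pvGet t "position" ∨ (p = pvGet t "position" ∧ c < pvGet t "column_count")
        then some idx else some t
    (s.1, s.2.1, t3)
  else s

def select_best_index_alt (suitable_indexes : List (List (String × Int))) (target_column : String) : Option (List (String × Int)) :=
  if suitable_indexes = [] then none
  else
    let r := suitable_indexes.foldl pvStep (none, none, none)
    match r.1 with
    | some x => some x
    | none =>
      match r.2.1 with
      | some x => some x
      | none => r.2.2

-- ===== PRECONDITION & SPEC =====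
-- Pre_ excludes dicts with duplicate keys (an assoc-list artefact a Python dict cannot carry) and requires
-- every index dict to contain both "column_count" and "position": A raises KeyError when one is missing,
-- except that A's lazy evaluation can return before noticing a missing "position" — B naturally raises there.
def Pre_select_best_index (suitable_indexes : List (List (String × Int))) (target_column : String) : Prop :=
  ∀ d ∈ suitable_indexes, (d.map Prod.fst).Nodup ∧
    (d.any (fun p => p.1 == "column_count")) = true ∧ (d.any (fun p => p.1 == "position")) = true
instance (suitable_indexes : List (List (String × Int))) (target_column : String) : Decidable (Pre_select_best_index suitable_indexes target_column) := by unfold Pre_select_best_index; infer_instance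

def pvWitness_select_best_index : (List (List (String × Int))) × String :=
  ([[("column_count", 2), ("position", 0)], [("column_count", 1), ("position", 1)]], "c")

def Spec_select_best_index (suitable_indexes : List (List (String × Int))) (target_column : String) (out : Option (List (String × Int))) : Prop := out = select_best_index_alt suitable_indexes target_column
instance (suitable_indexes : List (List (String × Int))) (target_column : String) (out : Option (List (String × Int))) : Decidable (Spec_select_best_index suitable_indexes target_column out) := by unfold Spec_select_best_index; infer_instance

-- ===== CLAIM (what is proved, stated in full; the proofs are below) =====
def Claim_equal_select_best_index : Prop := ∀ (suitable_indexes : List (List (String × Int))) (target_column : String), Dom_select_best_index suitable_indexes target_column → Pre_select_best_index suitable_indexes target_column → Spec_select_best_index suitable_indexes target_column (select_best_index suitable_indexes target_column)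

-- ===== LEMMAS AND PROOFS =====

-- component update functions of B's loop
def pvU1 (a : Option (List (String × Int))) (idx : List (String × Int)) : Option (List (String × Int)) :=
  if pvGet idx "position" == 0 then
    (if pvGet idx "column_count" == 1 && a.isNone then some idx else a)
  else a

def pvU2 (b : Option (List (String × Int))) (idx : List (String × Int)) : Option (List (String × Int)) :=
  if pvGet idx "position" == 0 then
    (match b with
     | none => some idx
     | some t => if pvGet idx "column_count" < pvGet t "column_count" then some idx else some t)
  else b

def pvU3 (c : Option (List (String × Int))) (idx : List (String × Int)) : Option (List (String × Int)) :=
  if pvGet idx "position" == 0 then c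
  else if pvGet idx "position" > 0 then
    (match c with
     | none => some idx
     | some t =>
       if pvGet idx "position" < pvGet t "position" ∨
          (pvGet idx "position" = pvGet t "position" ∧ pvGet idx "column_count" < pvGet t "column_count")
       then some idx else some t)
  else c

lemma pvStep_split (l : List (List (String × Int)))
    (s : Option (List (String × Int)) × Option (List (String × Int)) × Option (List (String × Int))) :
    l.foldl pvStep s = (l.foldl pvU1 s.1, l.foldl pvU2 s.2.1, l.foldl pvU3 s.2.2) := by
  induction l generalizing s with
  | nil => rfl
  | cons d t ih =>
    simp only [List.foldl_cons, ih]
    congr 1 <;> [skip; congr 1] <;>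
      (simp only [pvStep, pvU1, pvU2, pvU3]; split_ifs <;> rfl)

lemma pvU1_some (l : List (List (String × Int))) (x : List (String × Int)) :
    l.foldl pvU1 (some x) = some x := by
  induction l with
  | nil => rfl
  | cons d t ih => simp [pvU1, ih]

lemma pvU1_head (l : List (List (String × Int))) :
    l.foldl pvU1 none =
      (l.filter (fun idx => pvGet idx "column_count" == 1 && pvGet idx "position" == 0)).head? := by
  induction l with
  | nil => rfl
  | cons d t ih =>
    simp only [List.foldl_cons, List.filter_cons]
    by_cases h1 : pvGet d "column_count" = 1 <;> by_cases h2 : pvGet d "position" = 0 <;>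
      simp [pvU1, h1, h2, pvU1_some, ih]

lemma pvU2_fold (l : List (List (String × Int))) (b : Option (List (String × Int))) :
    l.foldl pvU2 b =
      (l.filter (fun idx => pvGet idx "position" == 0)).foldl
        (fun acc x => match acc with
          | none => some x
          | some m => if pvGet x "column_count" < pvGet m "column_count" then some x else some m) b := by
  induction l generalizing b with
  | nil => rfl
  | cons d t ih =>
    simp only [List.foldl_cons, List.filter_cons]
    by_cases h : pvGet d "position" = 0
    · simp only [h, beq_self_eq_true, if_true, List.foldl_cons, ih]
      congr 1
      cases b <;> simp [pvU2, h]
    · simp only [pvU2, beq_iff_eq, h, if_false, ih]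

lemma pvU2_min (l : List (List (String × Int))) :
    l.foldl pvU2 none =
      PySem.List.min? (l.filter (fun idx => pvGet idx "position" == 0))
        (fun x => pvGet x "column_count") := by
  rw [pvU2_fold]
  unfold PySem.List.min?
  congr 1
  funext acc x
  cases acc with
  | none => rfl
  | some m => simp

lemma pvU3_fold (l : List (List (String × Int))) (c : Option (List (String × Int))) :
    l.foldl pvU3 c =
      (l.filter (fun idx => decide (pvGet idx "position" > 0))).foldl
        (fun acc x => match acc with
          | none => some x
          | some m =>
            if (decide (pvGet x "position" < pvGet m "position") ||
                !decide (pvGet m "position" < pvGet x "position") &&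
                decide (pvGet x "column_count" < pvGet m "column_count")) = true
            then some x else some m) c := by
  induction l generalizing c with
  | nil => rfl
  | cons d t ih =>
    simp only [List.foldl_cons, List.filter_cons]
    by_cases h2 : pvGet d "position" > 0
    · have h : ¬ pvGet d "position" = 0 := by omega
      simp only [h2, decide_true, if_true, List.foldl_cons, ih]
      congr 1
      cases c with
      | none => simp [pvU3, h, h2]
      | some m =>
        simp only [pvU3, beq_iff_eq, h, if_false, h2, if_true]
        by_cases hlt : pvGet d "position" < pvGet m "position" <;>
          by_cases heq : pvGet d "position" = pvGet m "position" <;>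
          by_cases hcc : pvGet d "column_count" < pvGet m "column_count" <;>
          simp [hlt, heq, hcc] <;> omega
    · simp only [h2, decide_false, Bool.false_eq_true, if_false, ih]
      congr 1
      simp only [pvU3, beq_iff_eq, h2, if_false]
      split_ifs <;> rfl

lemma pvU3_min (l : List (List (String × Int))) :
    l.foldl pvU3 none =
      PySem.List.min2? (l.filter (fun idx => decide (pvGet idx "position" > 0)))
        (fun x => pvGet x "position") (fun x => pvGet x "column_count") := by
  rw [pvU3_fold]
  unfold PySem.List.min2?
  congr 1
  funext acc x
  cases acc with
  | none => rfl
  | some m => simp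

-- ===== VERDICT (by name: the statement is the Claim_ definition above) =====
theorem select_best_index_spec : Claim_equal_select_best_index := by
  intro l tc _ _
  unfold Spec_select_best_index select_best_index select_best_index_alt
  by_cases hnil : l = []
  · simp [hnil]
  · simp only [hnil, if_false]
    rw [pvStep_split, pvU1_head, pvU2_min, pvU3_min]
    cases hF1 : (l.filter (fun idx => pvGet idx "column_count" == 1 && pvGet idx "position" == 0)) with
    | cons x xs => simp
    | nil =>
      simp only [List.head?_nil]
      by_cases hF2 : (l.filter (fun idx => pvGet idx "position" == 0)) = []
      · simp only [hF2, ne_eq, not_true_eq_false, if_false, PySem.List.min?, List.foldl_nil]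
        by_cases hF3 : (l.filter (fun idx => decide (pvGet idx "position" > 0))) = []
        · simp [hF3, PySem.List.min2?]
        · simp only [hF3, not_false_eq_true, if_true]
      · simp only [hF2, ne_eq, not_false_eq_true, if_true]
        cases hmin : PySem.List.min? (l.filter (fun idx => pvGet idx "position" == 0))
            (fun x => pvGet x "column_count") with
        | some y => rfl
        | none =>
          exact absurd ((PySem.List.min?_eq_none_iff _ _).mp hmin) hF2
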